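-- pv_equiv track=rewrite | github.com/ppercent/Picture-Encoder | src/utils/utils.py | get_binary_form
-- ===== SOURCE A (Python) =====
-- def get_binary_form(letter):
--     if len(letter) != 1:
--         return None
--
--     encoded = letter.encode('utf-8')
--     bytes = ''
--     byte_len = 0
--     for byte in encoded:
--         bytes += format(byte, '08b')
--         byte_len += 1
--     return [bytes, str(format(byte_len - 1, '02b'))]
-- ===== SOURCE B (Python) =====
-- def get_binary_form(letter):
--     if len(letter) != 1:
--         return None
--
--     encoded = letter.encode('utf-8')
--     n = len(encoded)
--     value = int.from_bytes(encoded, 'big')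
--     return [format(value, '0{}b'.format(n * 8)), format(n - 1, '02b')]
-- ===== Notes on version B (the rewrite author's own statement) =====
-- stated objective: simpler
-- what changed: The per-byte loop that concatenates 8-bit chunks and counts bytes is replaced by a single big-endian int.from_bytes conversion formatted once to a width of 8*len(encoded) bits.
import Mathlib
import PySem

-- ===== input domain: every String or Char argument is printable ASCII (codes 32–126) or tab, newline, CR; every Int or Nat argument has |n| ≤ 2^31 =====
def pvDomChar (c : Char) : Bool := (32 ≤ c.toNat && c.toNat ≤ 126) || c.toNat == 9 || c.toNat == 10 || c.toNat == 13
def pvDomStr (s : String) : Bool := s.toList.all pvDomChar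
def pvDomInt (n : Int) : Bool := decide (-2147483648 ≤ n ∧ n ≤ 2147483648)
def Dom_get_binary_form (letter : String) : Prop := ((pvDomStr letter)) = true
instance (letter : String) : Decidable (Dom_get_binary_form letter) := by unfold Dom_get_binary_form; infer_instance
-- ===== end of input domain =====

-- B replaces A's per-byte concatenation loop by one int.from_bytes value formatted once (simpler, same cost).

-- format(n, '0{w}b') for n ≥ 0: binary digits padded with leading zeros to width w (shared library call of both Pythons)
def natBits (n : Nat) : List Char :=
  if h : n = 0 then []
  else natBits (n / 2) ++ [if n % 2 == 1 then '1' else '0']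
decreasing_by exact Nat.div_lt_self (Nat.pos_of_ne_zero h) (by norm_num)

def pyFormatB (n w : Nat) : List Char :=
  List.replicate (w - (natBits n).length) '0' ++ natBits n

-- ===== PORT A =====
-- letter.encode('utf-8') ported as the list of char codes: exact on the ASCII domain (one byte per char);
-- the string accumulation is carried over List Char (exact).
def get_binary_form (letter : String) : Option (List String) :=
  if PySem.Str.len letter ≠ 1 then none
  else
    let encoded := letter.toList.map (·.toNat)
    let st := encoded.foldl (fun (st : List Char × Nat) byte => (st.1 ++ pyFormatB byte 8, st.2 + 1)) ([], 0)
    some [String.ofList st.1, String.ofList (pyFormatB (st.2 - 1) 2)]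

-- ===== PORT B =====
def get_binary_form_alt (letter : String) : Option (List String) :=
  if PySem.Str.len letter ≠ 1 then none
  else
    let encoded := letter.toList.map (·.toNat)
    let n := encoded.length
    let value := encoded.foldl (fun acc b => acc * 256 + b) 0
    some [String.ofList (pyFormatB value (n * 8)), String.ofList (pyFormatB (n - 1) 2)]

-- ===== PRECONDITION & SPEC =====
def Spec_get_binary_form (letter : String) (out : Option (List String)) : Prop := out = get_binary_form_alt letter
instance (letter : String) (out : Option (List String)) : Decidable (Spec_get_binary_form letter out) := by unfold Spec_get_binary_form; infer_instance

-- ===== CLAIM (what is proved, stated in full; the proofs are below) =====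
def Claim_equal_get_binary_form : Prop := ∀ (letter : String), Dom_get_binary_form letter → Spec_get_binary_form letter (get_binary_form letter)

-- ===== LEMMAS AND PROOFS =====

-- ===== VERDICT (by name: the statement is the Claim_ definition above) =====
theorem get_binary_form_spec : Claim_equal_get_binary_form := by
  intro letter _
  unfold Spec_get_binary_form get_binary_form get_binary_form_alt
  by_cases h : PySem.Str.len letter = 1
  · have h2 : ¬ (PySem.Str.len letter ≠ 1) := not_not_intro h
    rw [if_neg h2, if_neg h2]
    have hl : letter.toList.length = 1 := by
      rw [PySem.Str.len_eq] at h; exact_mod_cast h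
    obtain ⟨c, hc⟩ := List.length_eq_one_iff.mp hl
    simp [hc]
  · rw [if_pos h, if_pos h]
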